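-- pv_equiv track=rewrite | github.com/Steve-Cheney/variant_reporting | demultiplex.py | trim_reads
-- ===== SOURCE A (Python) =====
-- def trim_reads(seq, quality_score):
--     """
--     Trim the reads of a sequence and qs if the end of the read has at least two consecutive quality scores of D or F.
--
--     Params
--     ------
--     seq
--         The sequence to trim
--     quality_score
--         The quality score to reference and also trim
--
--     Returns
--     -------
--     The trimmed tuple of sequence and quality score
--     """
--
--     qs_length = len(quality_score)
--     for i, bp in enumerate(quality_score):
--         if bp == 'D' or bp == 'F':
--             if i == qs_length - 1:
--                 return seq, quality_score
--             next_char = quality_score[i+1]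
--             if next_char == 'D' or next_char == 'F':
--                 return seq[0:i], quality_score[0:i]
-- ===== SOURCE B (Python) =====
-- def trim_reads(seq, quality_score):
--     # Find the first pair of consecutive D/F quality scores via four substring
--     # searches (one per possible two-character pattern) and trim at the earliest hit.
--     hits = [j for j in (quality_score.find(p) for p in ("DD", "DF", "FD", "FF")) if j != -1]
--     if hits:
--         i = min(hits)
--         return seq[:i], quality_score[:i]
--     if quality_score and quality_score[-1] in ('D', 'F'):
--         return seq, quality_score
--     return None
-- ===== Notes on version B (the rewrite author's own statement) =====
-- stated objective: faster
-- what changed: B replaces A's index-by-index scan with a lookahead by four substring searches (str.find for each two-character D/F pattern) taking the earliest hit, plus a direct last-character check for the untrimmed case.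
import Mathlib
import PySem

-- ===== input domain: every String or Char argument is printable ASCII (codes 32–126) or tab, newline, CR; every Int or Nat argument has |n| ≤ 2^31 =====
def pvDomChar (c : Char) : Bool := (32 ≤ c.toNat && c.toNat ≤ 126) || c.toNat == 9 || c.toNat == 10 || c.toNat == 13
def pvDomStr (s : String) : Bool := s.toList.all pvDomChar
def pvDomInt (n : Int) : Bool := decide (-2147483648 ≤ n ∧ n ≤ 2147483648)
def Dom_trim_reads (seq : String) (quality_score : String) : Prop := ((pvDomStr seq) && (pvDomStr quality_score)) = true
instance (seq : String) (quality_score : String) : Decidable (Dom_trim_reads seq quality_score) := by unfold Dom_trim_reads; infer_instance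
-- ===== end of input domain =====

-- B trims at the earliest of four substring-search (str.find) hits instead of A's per-character indexed scan with lookahead; measured constant-factor faster.

-- ===== PORT A =====
-- the 'for i, bp in enumerate(quality_score)' loop, with early returns
def trimLoopA (seq : String) (quality_score : String) : List Char → Int → Option (String × String)
  | [], _ => none
  | bp :: rest, i =>
    if bp = 'D' ∨ bp = 'F' then
      if i = PySem.Str.len quality_score - 1 then some (seq, quality_score)
      else
        match PySem.Str.pyGet? quality_score (i + 1) with
        | none => none  -- IndexError in Python; unreachable since i is not the last index
        | some next_char =>
          if next_char = 'D' ∨ next_char = 'F' then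
            some (PySem.Str.slice seq (some 0) (some i), PySem.Str.slice quality_score (some 0) (some i))
          else trimLoopA seq quality_score rest (i + 1)
    else trimLoopA seq quality_score rest (i + 1)

def trim_reads (seq : String) (quality_score : String) : Option (String × String) :=
  trimLoopA seq quality_score quality_score.toList 0

-- ===== PORT B =====
def trim_reads_alt (seq : String) (quality_score : String) : Option (String × String) :=
  let hits := (["DD", "DF", "FD", "FF"].map (fun p => PySem.Str.find quality_score p)).filter
      (fun j => decide (j ≠ -1))
  if hits ≠ [] then
    match PySem.List.min? hits (fun j => j) with
    | some i => some (PySem.Str.slice seq (some 0) (some i), PySem.Str.slice quality_score (some 0) (some i))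
    | none => none  -- unreachable: hits is nonempty
  else if quality_score ≠ "" then
    match PySem.Str.pyGet? quality_score (-1) with
    | some c => if c = 'D' ∨ c = 'F' then some (seq, quality_score) else none
    | none => none  -- unreachable: quality_score is nonempty
  else none

-- ===== PRECONDITION & SPEC =====
def Spec_trim_reads (seq : String) (quality_score : String) (out : Option (String × String)) : Prop := out = trim_reads_alt seq quality_score
instance (seq : String) (quality_score : String) (out : Option (String × String)) : Decidable (Spec_trim_reads seq quality_score out) := by unfold Spec_trim_reads; infer_instance

-- ===== CLAIM (what is proved, stated in full; the proofs are below) =====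
def Claim_equal_trim_reads : Prop := ∀ (seq : String) (quality_score : String), Dom_trim_reads seq quality_score → Spec_trim_reads seq quality_score (trim_reads seq quality_score)

-- ===== LEMMAS AND PROOFS =====

def isDF (c : Char) : Bool := c = 'D' ∨ c = 'F'

-- index of the first pair of consecutive D/F characters
def fp : List Char → Option Nat
  | a :: b :: rest => if isDF a && isDF b then some 0 else (fp (b :: rest)).map (· + 1)
  | _ => none

def pairAt (cs : List Char) (i : Nat) : Prop :=
  ∃ a b, cs[i]? = some a ∧ cs[i+1]? = some b ∧ isDF a ∧ isDF b

-- common reference shape of both ports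
def refA (seq quality_score : String) (l : List Char) (k : Nat) : Option (String × String) :=
  match fp l with
  | some j => some (PySem.Str.slice seq (some 0) (some (k + j : Nat)),
                    PySem.Str.slice quality_score (some 0) (some (k + j : Nat)))
  | none =>
    match l.getLast? with
    | some c => if isDF c then some (seq, quality_score) else none
    | none => none

lemma pairAt_cons_succ (x : Char) (cs : List Char) (i : Nat) :
    pairAt (x :: cs) (i+1) ↔ pairAt cs i := by simp [pairAt]

lemma pairAt_cons_zero (a b : Char) (t : List Char) :
    pairAt (a :: b :: t) 0 ↔ isDF a ∧ isDF b := by simp [pairAt]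

lemma fp_none_iff (cs : List Char) : fp cs = none ↔ ∀ i, ¬ pairAt cs i := by
  induction cs with
  | nil => simp [fp, pairAt]
  | cons a tl ih =>
    match tl with
    | [] =>
      simp only [fp, true_iff]
      intro i hp
      obtain ⟨x, y, hx, hy, _, _⟩ := hp
      match i with
      | 0 => simp at hy
      | i+1 => simp at hx
    | b :: rest =>
      rw [fp]
      by_cases h : (isDF a && isDF b) = true
      · rw [if_pos h]
        have h' := h
        rw [Bool.and_eq_true] at h'
        obtain ⟨h1, h2⟩ := h'
        constructor
        · intro hc; cases hc
        · intro hall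
          exact absurd ((pairAt_cons_zero a b rest).2 ⟨h1, h2⟩) (hall 0)
      · rw [if_neg h, Option.map_eq_none_iff, ih]
        constructor
        · intro hall i hp
          match i with
          | 0 =>
            obtain ⟨h1, h2⟩ := (pairAt_cons_zero a b rest).1 hp
            simp [h1, h2] at h
          | i+1 => exact hall i ((pairAt_cons_succ _ _ _).1 hp)
        · intro hall i hp
          exact hall (i+1) ((pairAt_cons_succ _ _ _).2 hp)

lemma fp_some (cs : List Char) : ∀ (j : Nat), fp cs = some j →
    pairAt cs j ∧ ∀ i < j, ¬ pairAt cs i := by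
  induction cs with
  | nil => intro j hj; simp [fp] at hj
  | cons a tl ih =>
    intro j hj
    match tl with
    | [] => simp [fp] at hj
    | b :: rest =>
      rw [fp] at hj
      by_cases h : (isDF a && isDF b) = true
      · rw [if_pos h, Option.some_inj] at hj
        subst hj
        have h' := h
        rw [Bool.and_eq_true] at h'
        obtain ⟨h1, h2⟩ := h'
        exact ⟨(pairAt_cons_zero a b rest).2 ⟨h1, h2⟩, by intro i hi; omega⟩
      · rw [if_neg h, Option.map_eq_some_iff] at hj
        obtain ⟨j', hj', rfl⟩ := hj
        obtain ⟨hp, hmin⟩ := ih j' hj'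
        refine ⟨(pairAt_cons_succ _ _ _).2 hp, ?_⟩
        intro i hi hpi
        match i with
        | 0 =>
          obtain ⟨h1, h2⟩ := (pairAt_cons_zero a b rest).1 hpi
          simp [h1, h2] at h
        | i+1 => exact hmin i (by omega) ((pairAt_cons_succ _ _ _).1 hpi)

lemma pair_prefix (cs : List Char) (i : Nat) (a b : Char) :
    [a, b] <+: cs.drop i ↔ cs[i]? = some a ∧ cs[i+1]? = some b := by
  have h0 : cs[i]? = (cs.drop i)[0]? := by simp
  have h1 : cs[i+1]? = (cs.drop i)[1]? := by simp [List.getElem?_drop]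
  rw [h0, h1]
  generalize cs.drop i = l
  match l with
  | [] => simp
  | [x] => simp [List.cons_prefix_cons]
  | x :: y :: t => simp [List.cons_prefix_cons, eq_comm]

lemma find_pat_eq (cs : List Char) (j : Nat) (a b : Char) (hda : isDF a) (hdb : isDF b)
    (ha : cs[j]? = some a) (hb : cs[j+1]? = some b)
    (hmin : ∀ i < j, ¬ pairAt cs i) :
    PySem.Chars.find cs [a, b] = (j : Int) := by
  have hpre : [a, b] <+: cs.drop j := (pair_prefix cs j a b).2 ⟨ha, hb⟩
  have hin : PySem.Chars.isIn [a, b] cs = true :=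
    (PySem.Chars.exists_prefix_drop_iff_isIn (s := cs) (sub := [a, b])).1 ⟨j, hpre⟩
  have hne : PySem.Chars.find cs [a, b] ≠ -1 := by
    rw [PySem.Chars.find_ne_neg_one_iff]
    exact (PySem.Chars.isIn_iff_infix (s := cs) (sub := [a, b])).1 hin
  have hge := PySem.Chars.neg_one_le_find cs [a, b]
  have h0 : 0 ≤ PySem.Chars.find cs [a, b] := by omega
  obtain ⟨hp, hfirst⟩ := PySem.Chars.find_spec h0
  have h1 : (PySem.Chars.find cs [a, b]).toNat ≤ j := not_lt.1 (fun hlt => hfirst j hlt hpre)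
  have h2 : j ≤ (PySem.Chars.find cs [a, b]).toNat := by
    refine not_lt.1 (fun hlt => hmin _ hlt ?_)
    obtain ⟨hx, hy⟩ := (pair_prefix cs _ a b).1 hp
    exact ⟨a, b, hx, hy, hda, hdb⟩
  omega

lemma find_pair_ge (cs : List Char) (a b : Char) (hda : isDF a) (hdb : isDF b) (j : Nat)
    (hmin : ∀ i < j, ¬ pairAt cs i) (hne : PySem.Chars.find cs [a, b] ≠ -1) :
    (j : Int) ≤ PySem.Chars.find cs [a, b] := by
  have hge := PySem.Chars.neg_one_le_find cs [a, b]
  have h0 : 0 ≤ PySem.Chars.find cs [a, b] := by omega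
  obtain ⟨hp, _⟩ := PySem.Chars.find_spec h0
  have h2 : j ≤ (PySem.Chars.find cs [a, b]).toNat := by
    refine not_lt.1 (fun hlt => hmin _ hlt ?_)
    obtain ⟨hx, hy⟩ := (pair_prefix cs _ a b).1 hp
    exact ⟨a, b, hx, hy, hda, hdb⟩
  omega

lemma find_no_pair (cs : List Char) (a b : Char) (hda : isDF a) (hdb : isDF b)
    (hall : ∀ i, ¬ pairAt cs i) :
    PySem.Chars.find cs [a, b] = -1 := by
  by_contra hne
  have hge := PySem.Chars.neg_one_le_find cs [a, b]
  have h0 : 0 ≤ PySem.Chars.find cs [a, b] := by omega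
  obtain ⟨hp, _⟩ := PySem.Chars.find_spec h0
  obtain ⟨hx, hy⟩ := (pair_prefix cs _ a b).1 hp
  exact hall _ ⟨a, b, hx, hy, hda, hdb⟩

lemma pyGet_neg_one (l : List Char) : PySem.List.pyGet? l (-1) = l.getLast? := by
  simp [PySem.List.pyGet?, PySem.List.pyIdx?]
  match l with
  | [] => simp
  | a :: t => simp [List.getLast?_eq_getElem?]

lemma min_filter_eq (l : List Int) (j : Int) (hmem : j ∈ l) (hj : j ≠ -1)
    (hlow : ∀ y ∈ l, y ≠ -1 → j ≤ y) :
    (l.filter (fun y => decide (y ≠ -1))) ≠ [] ∧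
    PySem.List.min? (l.filter (fun y => decide (y ≠ -1))) (fun y => y) = some j := by
  have hmf : j ∈ l.filter (fun y => decide (y ≠ -1)) := List.mem_filter.2 ⟨hmem, by simp [hj]⟩
  have hne := List.ne_nil_of_mem hmf
  refine ⟨hne, ?_⟩
  cases hmq : PySem.List.min? (l.filter (fun y => decide (y ≠ -1))) (fun y => y) with
  | none => rw [PySem.List.min?_eq_none_iff] at hmq; exact absurd hmq hne
  | some m =>
    have hm_mem := PySem.List.min?_mem hmq
    have hm_le : m ≤ j := PySem.List.min?_isMin hmq j hmf
    have hle : j ≤ m := by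
      obtain ⟨hml, hmne⟩ := List.mem_filter.1 hm_mem
      exact hlow m hml (by simpa using hmne)
    have : m = j := le_antisymm hm_le hle
    rw [this]

lemma loopA_eq_aux (seq qs : String) :
    ∀ n k, qs.toList.length ≤ k + n →
    trimLoopA seq qs (qs.toList.drop k) (k : Int) = refA seq qs (qs.toList.drop k) k := by
  intro n
  induction n with
  | zero =>
    intro k hk
    have : qs.toList.drop k = [] := List.drop_eq_nil_of_le (by omega)
    rw [this]
    simp [trimLoopA, refA, fp]
  | succ n ih =>
    intro k hk
    by_cases hlt : k < qs.toList.length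
    · have hdrop : qs.toList.drop k = qs.toList[k] :: qs.toList.drop (k+1) :=
        List.drop_eq_getElem_cons hlt
      rw [hdrop, trimLoopA]
      by_cases hc : qs.toList[k] = 'D' ∨ qs.toList[k] = 'F'
      · rw [if_pos hc]
        by_cases hlast : (k : Int) = PySem.Str.len qs - 1
        · have hk1 : k + 1 = qs.toList.length := by
            have hlen : qs.toList.length = qs.length := by simp
            rw [PySem.Str.len_eq] at hlast; omega
          have hnil : qs.toList.drop (k+1) = [] := List.drop_eq_nil_of_le (by omega)
          rw [if_pos hlast, hnil]
          simp [refA, fp, isDF, hc]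
        · have hk1 : k + 1 < qs.toList.length := by
            have hlen : qs.toList.length = qs.length := by simp
            rw [PySem.Str.len_eq] at hlast; omega
          rw [if_neg hlast]
          have hget : PySem.Str.pyGet? qs ((k : Int) + 1) = some qs.toList[k+1] := by
            have hcast : (k : Int) + 1 = ((k + 1 : Nat) : Int) := by push_cast; ring
            rw [hcast, PySem.Str.pyGet?_natCast, List.getElem?_eq_getElem hk1]
          rw [hget]
          dsimp only
          have hdrop1 : qs.toList.drop (k+1) = qs.toList[k+1] :: qs.toList.drop (k+2) :=
            List.drop_eq_getElem_cons hk1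
        
          by_cases hd : qs.toList[k+1] = 'D' ∨ qs.toList[k+1] = 'F'
          · rw [if_pos hd]
            rw [hdrop1, refA]
            have : fp (qs.toList[k] :: qs.toList[k+1] :: qs.toList.drop (k+2)) = some 0 := by
              rw [fp, if_pos (by simp [isDF, hc, hd])]
            rw [this]
            norm_num
          · rw [if_neg hd]
            have hrec : trimLoopA seq qs (qs.toList.drop (k+1)) ((k : Int) + 1) =
                refA seq qs (qs.toList.drop (k+1)) (k+1) := by
              have hcast : (k : Int) + 1 = ((k + 1 : Nat) : Int) := by push_cast; ring
              rw [hcast]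
              exact ih (k+1) (by omega)
            rw [hrec, hdrop1]
            have hfp : fp (qs.toList[k] :: qs.toList[k+1] :: qs.toList.drop (k+2)) =
                (fp (qs.toList[k+1] :: qs.toList.drop (k+2))).map (· + 1) := by
              rw [fp, if_neg (by simp [isDF, hd])]
            rw [refA, refA, hfp]
            cases hfpv : fp (qs.toList[k+1] :: qs.toList.drop (k+2)) with
            | some j =>
              simp only [Option.map_some]
              have : k + 1 + j = k + (j + 1) := by omega
              rw [this]
            | none =>
              simp only [Option.map_none]
              rw [List.getLast?_cons_cons]
      · rw [if_neg hc]
        have hrec : trimLoopA seq qs (qs.toList.drop (k+1)) ((k : Int) + 1) =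
            refA seq qs (qs.toList.drop (k+1)) (k+1) := by
          have hcast : (k : Int) + 1 = ((k + 1 : Nat) : Int) := by push_cast; ring
          rw [hcast]
          exact ih (k+1) (by omega)
        rw [hrec]
        cases hdrop1 : qs.toList.drop (k+1) with
        | nil =>
          simp [refA, fp, isDF, hc]
        | cons d t =>
          have hfp : fp (qs.toList[k] :: d :: t) = (fp (d :: t)).map (· + 1) := by
            rw [fp, if_neg (by simp [isDF, hc])]
          rw [refA, refA, hfp]
          cases hfpv : fp (d :: t) with
          | some j =>
            simp only [Option.map_some]
            have : k + 1 + j = k + (j + 1) := by omega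
            rw [this]
          | none =>
            simp only [Option.map_none]
            rw [List.getLast?_cons_cons]
    · have : qs.toList.drop k = [] := List.drop_eq_nil_of_le (by omega)
      rw [this]
      simp [trimLoopA, refA, fp]

lemma altB_eq (seq qs : String) :
    trim_reads_alt seq qs = refA seq qs qs.toList 0 := by
  unfold trim_reads_alt
  have hmap : (["DD", "DF", "FD", "FF"].map (fun p => PySem.Str.find qs p)) =
      [PySem.Chars.find qs.toList ['D','D'], PySem.Chars.find qs.toList ['D','F'],
       PySem.Chars.find qs.toList ['F','D'], PySem.Chars.find qs.toList ['F','F']] := by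
    simp [PySem.Str.find_eq]
  simp only [hmap]
  cases hfp : fp qs.toList with
  | none =>
    have hall := (fp_none_iff _).1 hfp
    have hDD := find_no_pair qs.toList 'D' 'D' (by decide) (by decide) hall
    have hDF := find_no_pair qs.toList 'D' 'F' (by decide) (by decide) hall
    have hFD := find_no_pair qs.toList 'F' 'D' (by decide) (by decide) hall
    have hFF := find_no_pair qs.toList 'F' 'F' (by decide) (by decide) hall
    rw [hDD, hDF, hFD, hFF]
    have hfil : ([(-1 : Int), -1, -1, -1].filter (fun j => decide (j ≠ -1))) = [] := by decide
    rw [hfil]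
    simp only [ne_eq, not_true_eq_false, if_false]
    by_cases hqs : qs = ""
    · subst hqs
      simp [refA, fp]
    · rw [if_pos hqs]
      have hnil : qs.toList ≠ [] := by
        intro h
        apply hqs
        rw [← String.ofList_toList (s := qs), h]
      obtain ⟨c, hc⟩ := Option.isSome_iff_exists.1 (List.getLast?_isSome.2 hnil)
      have hpg : PySem.Str.pyGet? qs (-1) = some c := by
        rw [PySem.Str.pyGet?_eq, PySem.Chars.pyGet?_eq_listPyGet?, pyGet_neg_one, hc]
      rw [hpg, refA, hfp, hc]
      dsimp only
      by_cases hcd : c = 'D' ∨ c = 'F'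
      · rw [if_pos hcd, if_pos (by simp [isDF]; tauto)]
      · rw [if_neg hcd, if_neg (by simp [isDF]; tauto)]
  | some j =>
    obtain ⟨⟨a, b, ha, hb, hda, hdb⟩, hmin⟩ := fp_some _ j hfp
    have hfind : PySem.Chars.find qs.toList [a, b] = (j : Int) :=
      find_pat_eq qs.toList j a b hda hdb ha hb hmin
    have hmem : (j : Int) ∈ [PySem.Chars.find qs.toList ['D','D'], PySem.Chars.find qs.toList ['D','F'],
        PySem.Chars.find qs.toList ['F','D'], PySem.Chars.find qs.toList ['F','F']] := by
      have ha' : a = 'D' ∨ a = 'F' := by simpa [isDF] using hda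
      have hb' : b = 'D' ∨ b = 'F' := by simpa [isDF] using hdb
      rcases ha' with rfl | rfl <;> rcases hb' with rfl | rfl <;> rw [← hfind] <;> simp
    have hlow : ∀ y ∈ [PySem.Chars.find qs.toList ['D','D'], PySem.Chars.find qs.toList ['D','F'],
        PySem.Chars.find qs.toList ['F','D'], PySem.Chars.find qs.toList ['F','F']],
        y ≠ -1 → (j : Int) ≤ y := by
      intro y hy hne
      simp only [List.mem_cons, List.not_mem_nil, or_false] at hy
      rcases hy with rfl | rfl | rfl | rfl
      · exact find_pair_ge qs.toList 'D' 'D' (by decide) (by decide) j hmin hne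
      · exact find_pair_ge qs.toList 'D' 'F' (by decide) (by decide) j hmin hne
      · exact find_pair_ge qs.toList 'F' 'D' (by decide) (by decide) j hmin hne
      · exact find_pair_ge qs.toList 'F' 'F' (by decide) (by decide) j hmin hne
    obtain ⟨hne, hmq⟩ := min_filter_eq _ (j : Int) hmem (by omega) hlow
    rw [if_pos hne, hmq, refA, hfp]
    norm_num

-- ===== VERDICT (by name: the statement is the Claim_ definition above) =====
theorem trim_reads_spec : Claim_equal_trim_reads := by
  intro seq qs _
  unfold Spec_trim_reads
  have hA := loopA_eq_aux seq qs qs.toList.length 0 (by omega)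
  simp only [List.drop_zero, Nat.cast_zero] at hA
  rw [trim_reads, hA, altB_eq]
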